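-- pv_equiv track=rewrite | github.com/saachisabnis/Projects | pubg-cheating-behavior/team_analysis.py | count_cheaters_in_teams
-- ===== SOURCE A (Python) =====
-- def count_cheaters_in_teams(team_dict, cheaters):
--    """
--    Count the number of cheaters in each team
--
--    arguments:
--    team_dict: a dictionary mapping (match_id, team_id) to a list of player IDs
--    cheaters: a set of cheaters
--
--    returns:
--    cheater_counts: a list of the number of cheaters in each team
--    """
--    cheater_counts = []
--    for (match_id, team_id), players in team_dict.items():
--        #count the number of cheaters in each team
--        num_cheaters = sum(1 for player in players if player in cheaters)
--        #ensure that cheater_counts is long enough to store the number of cheaters in each team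
--        while len(cheater_counts) <= num_cheaters:
--            cheater_counts.append(0)
--         #increment the count of teams with this number of cheaters
--        cheater_counts[num_cheaters] += 1
--    return cheater_counts
-- ===== SOURCE B (Python) =====
-- def count_cheaters_in_teams(team_dict, cheaters):
--     # Sort the per-team cheater counts, then emit the histogram by a single
--     # run-length scan over the sorted counts, filling gaps with zeros.
--     counts = sorted(len([p for p in players if p in cheaters])
--                     for players in team_dict.values())
--     result = []
--     prev = 0
--     run = 0
--     for c in counts:
--         if c == prev:
--             run += 1
--         else:
--             result.append(run)
--             result.extend([0] * (c - prev - 1))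
--             prev = c
--             run = 1
--     if counts:
--         result.append(run)
--     return result
-- ===== Notes on version B (the rewrite author's own statement) =====
-- stated objective: alternative
-- what changed: A tabulates directly into a histogram list grown on demand (a while-append pad, then an in-place increment, per team); B instead sorts the per-team cheater counts and produces the histogram by a single run-length scan over the sorted counts, emitting run lengths and zero-filling the gaps.
import Mathlib
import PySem

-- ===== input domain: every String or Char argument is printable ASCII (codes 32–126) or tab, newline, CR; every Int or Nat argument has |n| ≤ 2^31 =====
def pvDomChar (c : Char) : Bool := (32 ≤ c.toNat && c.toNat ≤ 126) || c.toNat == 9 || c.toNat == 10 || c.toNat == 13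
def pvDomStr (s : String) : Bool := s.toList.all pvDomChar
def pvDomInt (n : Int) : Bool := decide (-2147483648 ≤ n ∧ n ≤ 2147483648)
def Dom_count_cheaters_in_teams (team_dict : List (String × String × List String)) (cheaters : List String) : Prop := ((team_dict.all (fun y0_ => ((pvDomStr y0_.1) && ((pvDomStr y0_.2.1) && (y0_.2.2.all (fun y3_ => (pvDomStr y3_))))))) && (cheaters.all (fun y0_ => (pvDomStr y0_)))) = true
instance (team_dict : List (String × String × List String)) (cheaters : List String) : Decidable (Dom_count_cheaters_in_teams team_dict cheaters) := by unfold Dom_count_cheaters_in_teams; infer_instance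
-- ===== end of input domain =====

-- B uses a different algorithm: it sorts the per-team cheater counts and emits the
-- histogram by one run-length scan over the sorted counts (zero-filling the gaps),
-- instead of A's in-place tabulation into a histogram list grown on demand.

-- ===== PORT A =====
-- num_cheaters = sum(1 for player in players if player in cheaters)
def pvNumCheatA (players : List String) (cheaters : List String) : Nat :=
  players.foldl (fun s p => if cheaters.contains p then s + 1 else s) 0

-- while len(cheater_counts) <= num_cheaters: cheater_counts.append(0)
def pvPadTo (acc : List Int) (n : Nat) : List Int :=
  if acc.length ≤ n then pvPadTo (acc ++ [0]) n else acc
  termination_by n + 1 - acc.length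
  decreasing_by simp; omega

def count_cheaters_in_teams (team_dict : List (String × String × List String)) (cheaters : List String) : List Int :=
  team_dict.foldl (fun cheater_counts t =>
    let num_cheaters := pvNumCheatA t.2.2 cheaters
    (pvPadTo cheater_counts num_cheaters).modify num_cheaters (· + 1)) []

-- ===== PORT B =====
-- len([p for p in players if p in cheaters])
def pvNumCheatB (players : List String) (cheaters : List String) : Nat :=
  (players.filter (fun p => cheaters.contains p)).length

-- the state (result, prev, run) of Source B's scan loop
def pvScanStep (st : List Int × Nat × Nat) (c : Nat) : List Int × Nat × Nat :=
  if c == st.2.1 then (st.1, st.2.1, st.2.2 + 1)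
  else (st.1 ++ (st.2.2 : Int) :: List.replicate (c - st.2.1 - 1) 0, c, 1)

def count_cheaters_in_teams_alt (team_dict : List (String × String × List String)) (cheaters : List String) : List Int :=
  let counts := (team_dict.map (fun t => pvNumCheatB t.2.2 cheaters)).mergeSort (fun a b => a ≤ b)
  let st := counts.foldl pvScanStep ([], 0, 0)
  if counts.isEmpty then st.1 else st.1 ++ [(st.2.2 : Int)]

-- ===== PRECONDITION & SPEC =====
def Spec_count_cheaters_in_teams (team_dict : List (String × String × List String)) (cheaters : List String) (out : List Int) : Prop := out = count_cheaters_in_teams_alt team_dict cheaters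
instance (team_dict : List (String × String × List String)) (cheaters : List String) (out : List Int) : Decidable (Spec_count_cheaters_in_teams team_dict cheaters out) := by unfold Spec_count_cheaters_in_teams; infer_instance

-- ===== CLAIM (what is proved, stated in full; the proofs are below) =====
def Claim_equal_count_cheaters_in_teams : Prop := ∀ (team_dict : List (String × String × List String)) (cheaters : List String), Dom_count_cheaters_in_teams team_dict cheaters → Spec_count_cheaters_in_teams team_dict cheaters (count_cheaters_in_teams team_dict cheaters)

-- ===== LEMMAS AND PROOFS =====

-- the two ways of counting cheaters in a team agree
theorem pvFoldCount (cheaters : List String) : ∀ (ps : List String) (s : Nat),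
    ps.foldl (fun s p => if cheaters.contains p then s + 1 else s) s =
    s + (ps.filter (fun p => cheaters.contains p)).length := by
  intro ps
  induction ps with
  | nil => intro s; simp
  | cons p ps ih =>
    intro s
    simp only [List.foldl_cons, List.filter_cons]
    by_cases h : cheaters.contains p = true
    · simp only [h, if_true, List.length_cons]
      rw [ih]
      omega
    · simp only [h, Bool.false_eq_true, if_false]
      rw [ih]

theorem pvNumCheat_eq (players cheaters : List String) :
    pvNumCheatA players cheaters = pvNumCheatB players cheaters := by
  unfold pvNumCheatA pvNumCheatB
  rw [pvFoldCount]
  exact Nat.zero_add _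

-- pvPadTo in closed form
theorem pvPadTo_eq (acc : List Int) (n : Nat) :
    pvPadTo acc n = acc ++ List.replicate (n + 1 - acc.length) 0 := by
  by_cases h : acc.length ≤ n
  · rw [pvPadTo, if_pos h, pvPadTo_eq (acc ++ [0]) n]
    simp only [List.append_assoc]
    congr 1
    have : n + 1 - acc.length = (n + 1 - (acc ++ [0]).length) + 1 := by simp; omega
    rw [this]
    simp [List.replicate_succ]
  · rw [pvPadTo, if_neg h]
    have : n + 1 - acc.length = 0 := by omega
    simp [this]
  termination_by n + 1 - acc.length
  decreasing_by simp; omega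

-- canonical histogram: length = (1 + max) on nonempty input, entries = multiplicities
def pvLmax (cs : List Nat) : Nat := cs.foldl (fun m n => max m (n + 1)) 0
def pvHist (cs : List Nat) : List Int :=
  (List.range (pvLmax cs)).map (fun i => (cs.count i : Int))

theorem pvLmax_bound : ∀ (cs : List Nat) (a : Nat),
    a ≤ cs.foldl (fun m n => max m (n + 1)) a ∧
    ∀ n ∈ cs, n < cs.foldl (fun m n => max m (n + 1)) a := by
  intro cs
  induction cs with
  | nil => intro a; simp
  | cons c cs ih =>
    intro a
    simp only [List.foldl_cons, List.mem_cons]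
    obtain ⟨h1, h2⟩ := ih (max a (c + 1))
    refine ⟨by omega, ?_⟩
    rintro n (rfl | hn)
    · omega
    · exact h2 n hn

theorem pvCount_zero_of_ge (cs : List Nat) (j : Nat) (hj : pvLmax cs ≤ j) :
    cs.count j = 0 := by
  rw [List.count_eq_zero]
  intro hmem
  have := (pvLmax_bound cs 0).2 j hmem
  unfold pvLmax at hj
  omega

-- A's fold computes the canonical histogram
theorem pvFoldA_eq_hist (cs : List Nat) :
    cs.foldl (fun acc n => (pvPadTo acc n).modify n (· + 1)) [] = pvHist cs := by
  induction cs using List.reverseRecOn with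
  | nil => rfl
  | append_singleton cs n ih =>
    rw [List.foldl_append, List.foldl_cons, List.foldl_nil, ih]
    have hlen : (pvHist cs).length = pvLmax cs := by simp [pvHist]
    have hLapp : pvLmax (cs ++ [n]) = max (pvLmax cs) (n + 1) := by
      simp [pvLmax, List.foldl_append]
    rw [pvPadTo_eq]
    apply List.ext_getElem
    · simp [pvHist, hLapp]; omega
    · intro j h1 h2
      have hj : j < max (pvLmax cs) (n + 1) := by
        simp [hlen] at h1; omega
      rw [List.getElem_modify]
      have hget : ∀ (hh : j < (pvHist cs ++ List.replicate (n + 1 - (pvHist cs).length) 0).length),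
          (pvHist cs ++ List.replicate (n + 1 - (pvHist cs).length) 0)[j]'hh = (cs.count j : Int) := by
        intro hh
        by_cases hlt : j < pvLmax cs
        · rw [List.getElem_append_left (by omega)]
          simp [pvHist]
        · rw [List.getElem_append_right (by omega)]
          simp [pvCount_zero_of_ge cs j (by omega)]
      have hrhs : (pvHist (cs ++ [n]))[j]'h2 = ((cs ++ [n]).count j : Int) := by
        simp [pvHist]
      rw [hrhs]
      rw [List.count_append, List.count_singleton]
      split
      · next heq => subst heq; rw [hget]; simp
      · next hne => rw [hget]; simp [hne]

-- pvLmax is one more than the plain maximum, on nonempty lists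
theorem pvLmax_succ : ∀ (cs : List Nat) (a : Nat),
    cs.foldl (fun m n => max m (n + 1)) (a + 1) = cs.foldl (fun m n => max m n) a + 1 := by
  intro cs
  induction cs with
  | nil => intro a; rfl
  | cons c cs ih =>
    intro a
    simp only [List.foldl_cons]
    rw [show max (a + 1) (c + 1) = (max a c) + 1 by omega, ih]

-- fold max only grows
theorem pvFoldMax_le : ∀ (cs : List Nat) (a : Nat), a ≤ cs.foldl (fun m n => max m n) a := by
  intro cs
  induction cs with
  | nil => intro a; simp
  | cons c cs ih =>
    intro a
    simp only [List.foldl_cons]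
    exact le_trans (le_max_left a c) (ih (max a c))

-- B's run-length scan over a sorted list, characterised against the multiplicities
theorem pvScan_inv : ∀ (cs : List Nat) (result : List Int) (prev run : Nat),
    List.Pairwise (· ≤ ·) cs → (∀ n ∈ cs, prev ≤ n) →
    (cs.foldl pvScanStep (result, prev, run)).1 ++ [((cs.foldl pvScanStep (result, prev, run)).2.2 : Int)] =
      result ++ (List.range' prev (cs.foldl (fun m n => max m n) prev - prev + 1)).map
        (fun j => (if j = prev then (run : Int) else 0) + (cs.count j : Int)) := by
  intro cs
  induction cs with
  | nil =>
    intro result prev run _ _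
    simp [List.range']
  | cons c cs ih =>
    intro result prev run hpw hge
    have hc : prev ≤ c := hge c (List.mem_cons_self ..)
    have hcs : ∀ n ∈ cs, c ≤ n := fun n hn => (List.pairwise_cons.mp hpw).1 n hn
    have hpw' : List.Pairwise (· ≤ ·) cs := (List.pairwise_cons.mp hpw).2
    simp only [List.foldl_cons]
    by_cases hceq : c = prev
    · subst hceq
      rw [show pvScanStep (result, c, run) c = (result, c, run + 1) by simp [pvScanStep]]
      rw [ih result c (run + 1) hpw' hcs]
      simp only [max_self]
      congr 1
      apply List.map_congr_left
      intro j hj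
      rw [List.count_cons]
      by_cases hjc : j = c
      · subst hjc; simp; omega
      · simp [hjc]; omega
    · have hlt : prev < c := lt_of_le_of_ne hc (fun h => hceq h.symm)
      rw [show pvScanStep (result, prev, run) c =
            (result ++ (run : Int) :: List.replicate (c - prev - 1) 0, c, 1) by
          simp [pvScanStep]; omega]
      rw [ih _ c 1 hpw' hcs]
      rw [show max prev c = c by omega]
      have hnotmem : ∀ j, j < c → (c :: cs).count j = 0 := by
        intro j hj
        rw [List.count_eq_zero]
        intro hmem
        rcases List.mem_cons.mp hmem with rfl | hm
        · omega
        · have := hcs j hm; omega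
      have hMc : c ≤ cs.foldl (fun m n => max m n) c := pvFoldMax_le cs c
      have hsplit : List.range' prev (cs.foldl (fun m n => max m n) c - prev + 1) =
          List.range' prev (c - prev) ++ List.range' c (cs.foldl (fun m n => max m n) c - c + 1) := by
        have h' := List.range'_append_1 (s := prev) (m := c - prev)
          (n := cs.foldl (fun m n => max m n) c - c + 1)
        rw [show prev + (c - prev) = c by omega] at h'
        rw [h']
        congr 1
        omega
      rw [hsplit, List.map_append]
      have h1 : List.map (fun j => (if j = prev then (run : Int) else 0) + (List.count j (c :: cs) : Int))
          (List.range' prev (c - prev)) = (run : Int) :: List.replicate (c - prev - 1) 0 := by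
        apply List.ext_getElem
        · simp; omega
        · intro j hj1 hj2
          simp only [List.getElem_map, List.getElem_range']
          cases j with
          | zero => simp [hnotmem prev (by omega)]
          | succ k =>
            have hk : k < c - prev - 1 := by
              simp at hj2; omega
            simp only [List.getElem_cons_succ, List.getElem_replicate]
            rw [if_neg (by omega), hnotmem _ (by omega)]
            simp
      rw [h1]
      rw [← List.append_assoc]
      congr 1
      apply List.map_congr_left
      intro j hj
      have hjc : c ≤ j := by
        have := List.mem_range'.mp hj; omega
      rw [List.count_cons, if_neg (by omega : ¬ j = prev)]
      by_cases hje : j = c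
      · subst hje; simp; omega
      · simp [hje]; omega

-- the scan of the full (sorted) list is the canonical histogram
theorem pvScan_eq_hist (cs : List Nat) (hpw : List.Pairwise (· ≤ ·) cs) :
    (if cs.isEmpty then (cs.foldl pvScanStep ([], 0, 0)).1
     else (cs.foldl pvScanStep ([], 0, 0)).1 ++ [((cs.foldl pvScanStep ([], 0, 0)).2.2 : Int)]) =
    pvHist cs := by
  match cs with
  | [] => rfl
  | c :: rest =>
    rw [if_neg (by simp : ¬ ((c :: rest).isEmpty = true))]
    rw [pvScan_inv (c :: rest) [] 0 0 hpw (by intro n _; omega)]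
    have hL : pvLmax (c :: rest) = (c :: rest).foldl (fun m n => max m n) 0 + 1 := by
      unfold pvLmax
      simp only [List.foldl_cons]
      rw [show max 0 (c + 1) = (max 0 c) + 1 by omega, pvLmax_succ]
    unfold pvHist
    rw [hL]
    simp only [List.nil_append, Nat.sub_zero, List.range_eq_range']
    apply List.map_congr_left
    intro j hj
    by_cases hj0 : j = 0
    · subst hj0; simp
    · simp [hj0]

-- pvHist only depends on the multiset of counts
theorem pvHist_perm (cs ds : List Nat) (h : cs.Perm ds) : pvHist cs = pvHist ds := by
  have hmax : pvLmax cs = pvLmax ds := by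
    unfold pvLmax
    exact h.foldl_eq (rcomm := ⟨fun m a b => max_right_comm m (a + 1) (b + 1)⟩) 0
  unfold pvHist
  rw [hmax]
  apply List.map_congr_left
  intro j _
  rw [h.count_eq]

-- ===== VERDICT (by name: the statement is the Claim_ definition above) =====
theorem count_cheaters_in_teams_spec : Claim_equal_count_cheaters_in_teams := by
  intro team_dict cheaters _
  unfold Spec_count_cheaters_in_teams count_cheaters_in_teams count_cheaters_in_teams_alt
  simp only []
  set cs := team_dict.map (fun t => pvNumCheatB t.2.2 cheaters) with hcs
  have hA : team_dict.foldl (fun cheater_counts t =>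
      (pvPadTo cheater_counts (pvNumCheatA t.2.2 cheaters)).modify (pvNumCheatA t.2.2 cheaters) (· + 1)) [] =
      cs.foldl (fun acc n => (pvPadTo acc n).modify n (· + 1)) [] := by
    rw [hcs, List.foldl_map]
    simp only [pvNumCheat_eq]
  rw [hA, pvFoldA_eq_hist]
  have hpw : List.Pairwise (· ≤ ·) (cs.mergeSort (fun a b => a ≤ b)) := by
    have := List.pairwise_mergeSort (le := fun a b : Nat => decide (a ≤ b))
      (fun a b c hab hbc => by simp at hab hbc ⊢; omega) (fun a b => by simp; omega) cs
    simpa using this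
  rw [pvScan_eq_hist (cs.mergeSort (fun a b => a ≤ b)) hpw]
  exact pvHist_perm cs _ (List.mergeSort_perm cs _).symm
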